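-- pv_equiv track=rewrite | github.com/JoseAlanis/fnirs_sanbox | utils.py | add_occurrence_suffix
-- ===== SOURCE A (Python) =====
-- def add_occurrence_suffix(labels):
--     """
--     Append occurrence-based suffixes to each label in the list to handle duplicate items.
--     Each unique item receives a suffix in the format "_n", where n is its occurrence count.
--
--     Parameters:
--     ----------
--     labels : list of str
--         A list of label strings, potentially containing duplicates.
--
--     Returns:
--     -------
--     list of str
--         A list of labels where duplicate items are suffixed with an occurrence count.
--
--     Example:
--     --------
--     >>> labels = ["A", "B", "A", "A", "B"]
--     >>> add_occurrence_suffix(labels)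
--     ["A_1", "B_1", "A_2", "A_3", "B_2"]
--     """
--     # Dictionary to keep track of occurrences
--     occurrence_count = {}
--
--     # Create the modified list
--     output_list = []
--     for item in labels:
--         # Update occurrence count
--         if item not in occurrence_count:
--             occurrence_count[item] = 1
--         else:
--             occurrence_count[item] += 1
--         # Append the item with its occurrence index as a suffix
--         output_list.append(f"{item}_{occurrence_count[item]}")
--
--     return output_list
-- ===== SOURCE B (Python) =====
-- def add_occurrence_suffix(labels):
--     return [f"{x}_{labels[:i + 1].count(x)}" for i, x in enumerate(labels)]
-- ===== Notes on version B (the rewrite author's own statement) =====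
-- stated objective: idiomatic
-- what changed: Replaced the maintained occurrence-count dict and explicit append loop by a single comprehension that computes each suffix as the count of the label in the inclusive prefix labels[:i+1].
import Mathlib
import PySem

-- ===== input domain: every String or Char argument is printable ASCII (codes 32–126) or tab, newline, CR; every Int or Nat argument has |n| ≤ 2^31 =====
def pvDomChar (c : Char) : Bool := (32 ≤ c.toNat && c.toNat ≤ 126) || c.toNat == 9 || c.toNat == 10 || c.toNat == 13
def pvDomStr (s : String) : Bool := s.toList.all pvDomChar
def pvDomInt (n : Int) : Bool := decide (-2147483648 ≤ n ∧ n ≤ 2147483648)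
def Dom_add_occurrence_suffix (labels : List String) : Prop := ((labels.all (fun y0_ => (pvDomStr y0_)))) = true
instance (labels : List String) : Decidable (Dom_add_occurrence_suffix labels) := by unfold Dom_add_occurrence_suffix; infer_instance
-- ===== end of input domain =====

-- B replaces A's maintained occurrence dict + append loop with a comprehension counting each
-- label in its inclusive prefix (idiomatic; not faster).

-- ===== PORT A =====
-- loop body of A: update the occurrence dict, append the suffixed label
def pvStepA (st : PySem.Dict String Int × List String) (item : String) :
    PySem.Dict String Int × List String :=
  let occ := if st.1.contains item = false
    then st.1.insert item 1
    else st.1.modify item 0 (· + 1)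
  (occ, st.2 ++ [item ++ "_" ++ PySem.Int.toStr (occ.getD item 0)])

def add_occurrence_suffix (labels : List String) : List String :=
  (labels.foldl pvStepA (PySem.Dict.empty, [])).2

-- ===== PORT B =====
def add_occurrence_suffix_alt (labels : List String) : List String :=
  (PySem.List.enumerate labels 0).map
    (fun p => p.2 ++ "_" ++
      PySem.Int.toStr ((PySem.List.count (PySem.List.slice labels none (some (p.1 + 1))) p.2 : Int)))

-- ===== PRECONDITION & SPEC =====
def Spec_add_occurrence_suffix (labels : List String) (out : List String) : Prop := out = add_occurrence_suffix_alt labels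
instance (labels : List String) (out : List String) : Decidable (Spec_add_occurrence_suffix labels out) := by unfold Spec_add_occurrence_suffix; infer_instance

-- ===== CLAIM (what is proved, stated in full; the proofs are below) =====
def Claim_equal_add_occurrence_suffix : Prop := ∀ (labels : List String), Dom_add_occurrence_suffix labels → Spec_add_occurrence_suffix labels (add_occurrence_suffix labels)

-- ===== LEMMAS AND PROOFS =====

-- canonical result: each label gets "_(count in its inclusive prefix)"
def pvCore (pre : List String) : List String → List String
  | [] => []
  | x :: rest => (x ++ "_" ++ PySem.Int.toStr ((pre.count x : Int) + 1)) :: pvCore (pre ++ [x]) rest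

theorem pvA_loop (xs : List String) : ∀ (pre : List String) (occ : PySem.Dict String Int)
    (out : List String),
    (∀ v, occ.contains v = pre.contains v) →
    (∀ v, occ.getD v 0 = (pre.count v : Int)) →
    (xs.foldl pvStepA (occ, out)).2 = out ++ pvCore pre xs := by
  induction xs with
  | nil => intro pre occ out _ _; simp [pvCore]
  | cons x rest ih =>
    intro pre occ out hc hg
    simp only [List.foldl_cons, pvStepA, pvCore]
    rcases Bool.eq_false_or_eq_true (occ.contains x) with h | h
    · -- repeated occurrence: occurrence_count[item] += 1
      rw [if_neg (by simp [h])]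
      have hC : ∀ v, (occ.modify x 0 (· + 1)).contains v = (pre ++ [x]).contains v := by
        intro v
        rw [PySem.Dict.contains_modify]
        by_cases hv : v = x
        · subst hv; simp
        · simp [hv, hc v]
      have hG : ∀ v, (occ.modify x 0 (· + 1)).getD v 0 = ((pre ++ [x]).count v : Int) := by
        intro v
        by_cases hv : v = x
        · subst hv
          rw [PySem.Dict.getD_modify_self, hg v]
          have hcnt : List.count v (pre ++ [v]) = List.count v pre + 1 := by
            simp [List.count_append]
          rw [hcnt]; push_cast; ring
        · rw [PySem.Dict.getD_modify_of_ne _ _ _ hv, hg v]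
          have h0 : List.count v [x] = 0 := by
            simp [List.count_singleton]; exact fun hh => hv hh.symm
          simp [List.count_append, h0]
      rw [ih (pre ++ [x]) _ _ hC hG, PySem.Dict.getD_modify_self, hg x]
      simp
    · -- first occurrence: insert item 1
      have hmem : x ∉ pre := by
        have := hc x; rw [h] at this
        simpa [List.contains_iff_mem] using this.symm
      have hx : pre.count x = 0 := List.count_eq_zero.mpr hmem
      rw [if_pos (by rw [h])]
      have hC : ∀ v, (occ.insert x 1).contains v = (pre ++ [x]).contains v := by
        intro v
        rw [PySem.Dict.contains_insert]
        by_cases hv : v = x <;> simp [hv, hc v]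
      have hG : ∀ v, (occ.insert x 1).getD v 0 = ((pre ++ [x]).count v : Int) := by
        intro v
        by_cases hv : v = x
        · subst hv; simp [PySem.Dict.getD_insert_self, List.count_append, hx]
        · rw [PySem.Dict.getD_insert_of_ne _ _ _ hv, hg v]
          have h0 : List.count v [x] = 0 := by
            simp [List.count_singleton]; exact fun hh => hv hh.symm
          simp [List.count_append, h0]
      rw [ih (pre ++ [x]) _ _ hC hG, PySem.Dict.getD_insert_self]
      simp [hx]

theorem pvB_map (xs : List String) : ∀ (pre : List String),
    (PySem.List.enumerate xs ((pre.length : Nat) : Int)).map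
      (fun p => p.2 ++ "_" ++
        PySem.Int.toStr ((PySem.List.count
          (PySem.List.slice (pre ++ xs) none (some (p.1 + 1))) p.2 : Int)))
    = pvCore pre xs := by
  induction xs with
  | nil => intro pre; simp [PySem.List.enumerate, pvCore]
  | cons x rest ih =>
    intro pre
    rw [PySem.List.enumerate_cons, List.map_cons, pvCore]
    refine congrArg₂ List.cons ?_ ?_
    · have hcast : ((pre.length : Nat) : Int) + 1 = ((pre.length + 1 : Nat) : Int) := by push_cast; ring
      have htake : (pre ++ x :: rest).take (pre.length + 1) = pre ++ [x] := by
        simp [List.take_append]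
      simp only [hcast, PySem.List.slice_to_natCast, htake, PySem.List.count_eq]
      have hcnt : List.count x (pre ++ [x]) = List.count x pre + 1 := by
        simp [List.count_append]
      rw [hcnt]; norm_cast
    · have h1 : ((pre.length : Nat) : Int) + 1 = (((pre ++ [x]).length : Nat) : Int) := by
        simp
      have h2 : pre ++ x :: rest = (pre ++ [x]) ++ rest := by simp
      rw [h1, h2]
      exact ih (pre ++ [x])

theorem pv_eq (labels : List String) :
    add_occurrence_suffix labels = add_occurrence_suffix_alt labels := by
  unfold add_occurrence_suffix add_occurrence_suffix_alt
  rw [pvA_loop labels [] PySem.Dict.empty []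
      (fun v => by simp [PySem.Dict.contains_empty])
      (fun v => by simp [PySem.Dict.getD_empty])]
  have := pvB_map labels []
  simpa using this.symm

-- ===== VERDICT (by name: the statement is the Claim_ definition above) =====
theorem add_occurrence_suffix_spec : Claim_equal_add_occurrence_suffix := by
  intro labels _
  unfold Spec_add_occurrence_suffix
  exact pv_eq labels
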